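-- pv_equiv track=rewrite | github.com/soykeepgoing/algorithm | boj/bfs/16234.py | has_more
-- ===== SOURCE A (Python) =====
-- from collections import deque
--
-- DIRECTIONS = [(0, 1), (0, -1), (1, 0), (-1, 0)]
--
-- def bfs(i, j, board, visited, N, L, R):
--     queue = deque([[i, j]])
--
--     sum_people = board[i][j]
--     count_country = 1
--     mem_country = []
--
--     while queue:
--         i, j = queue.popleft()
--         mem_country.append([i, j])
--         value = board[i][j]
--
--         for di, dj in DIRECTIONS:
--             ni = i + di
--             nj = j + dj
--             if ni in range(N) and nj in range(N):
--                 if not visited[ni][nj]: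
--                     if abs(value - board[ni][nj]) in range(L, R + 1):
--                         queue.append([ni, nj])
--                         visited[ni][nj] = True
--                         count_country += 1
--                         sum_people += board[ni][nj]
--
--     new_value = sum_people // count_country
--
--     for i, j in mem_country:
--         board[i][j] = new_value
--
--     return count_country
--
-- def has_more(board, N, L, R):
--     visited = [[False for _ in range(N)] for _ in range(N)]
--
--     flag = False
--
--     for i in range(N):
--         for j in range(N):
--             if not visited[i][j]:
--                 visited[i][j] = True
--                 count_country = bfs(i, j, board, visited, N, L, R)
--                 if count_country > 1:
--                     flag = True
--     return flag
-- ===== SOURCE B (Python) =====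
-- def has_more(board, N, L, R):
--     # Return-value equivalent to A (A also mutates `board` in place; B does not).
--     # A merged component exists iff some pair of grid-adjacent cells differs by d with L <= d <= R,
--     # so a single scan of right/down neighbours suffices -- no BFS, no visited matrix, no writes.
--     for i in range(N):
--         for j in range(N):
--             v = board[i][j]
--             if j + 1 < N and L <= abs(v - board[i][j + 1]) <= R:
--                 return True
--             if i + 1 < N and L <= abs(v - board[i + 1][j]) <= R:
--                 return True
--     return False
-- ===== Notes on version B (the rewrite author's own statement) =====
-- stated objective: simpler
-- what changed: B drops the BFS/queue/visited/averaging machinery entirely: a merge happens iff some grid-adjacent pair of cells differs by d with L <= d <= R, so B just scans each cell's right and down neighbour and returns at the first in-range pair (A's in-place board mutation is not reproduced; only the return value matches).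
import Mathlib
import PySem

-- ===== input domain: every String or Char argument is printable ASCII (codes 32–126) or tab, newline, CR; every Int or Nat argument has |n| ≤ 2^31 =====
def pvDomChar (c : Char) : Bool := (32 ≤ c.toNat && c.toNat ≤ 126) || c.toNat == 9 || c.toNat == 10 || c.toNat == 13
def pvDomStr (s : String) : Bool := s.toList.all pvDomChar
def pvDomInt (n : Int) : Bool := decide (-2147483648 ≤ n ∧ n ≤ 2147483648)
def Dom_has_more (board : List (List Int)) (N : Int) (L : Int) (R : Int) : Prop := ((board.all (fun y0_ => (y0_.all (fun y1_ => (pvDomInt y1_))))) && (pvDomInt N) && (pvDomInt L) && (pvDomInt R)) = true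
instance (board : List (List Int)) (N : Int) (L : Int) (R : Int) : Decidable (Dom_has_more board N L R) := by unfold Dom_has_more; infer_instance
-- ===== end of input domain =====

-- B replaces A's BFS component merge by a single scan for one adjacent in-range pair (only the
-- return value is compared: A also mutates `board` in place, B does not).

-- ===== PORT A =====
-- board[i][j] read; the getD defaults are never reached on inputs satisfying Pre_has_more
-- (indices are guarded 0 ≤ · < N before every read).
def pvGetB (b : List (List Int)) (i j : Int) : Int :=
  (PySem.List.pyGet? ((PySem.List.pyGet? b i).getD []) j).getD 0

-- visited[i][j] read; default true so that an out-of-matrix read (unreachable under Pre_) enqueues nothing.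
def pvGetV (v : List (List Bool)) (i j : Int) : Bool :=
  (PySem.List.pyGet? ((PySem.List.pyGet? v i).getD []) j).getD true

-- m[i][j] = x; exact for the nonnegative in-range indices A uses (all writes are guarded 0 ≤ · < N).
def pvSet2 {α : Type} (m : List (List α)) (i j : Int) (x : α) : List (List α) :=
  m.set i.toNat ((m.getD i.toNat []).set j.toNat x)

def pvDirs : List (Int × Int) := [(0, 1), (0, -1), (1, 0), (-1, 0)]

-- one direction check of A's inner `for di, dj in DIRECTIONS` loop; state = (queue, visited, count, sum)
def pvNbr (board : List (List Int)) (N L R i j value : Int)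
    (s : List (Int × Int) × List (List Bool) × Int × Int) (d : Int × Int) :
    List (Int × Int) × List (List Bool) × Int × Int :=
  if (0 ≤ i + d.1 ∧ i + d.1 < N) ∧ (0 ≤ j + d.2 ∧ j + d.2 < N) then
    if pvGetV s.2.1 (i + d.1) (j + d.2) = false then
      if L ≤ |value - pvGetB board (i + d.1) (j + d.2)| ∧
          |value - pvGetB board (i + d.1) (j + d.2)| ≤ R then
        (s.1 ++ [(i + d.1, j + d.2)], pvSet2 s.2.1 (i + d.1) (j + d.2) true,
          s.2.2.1 + 1, s.2.2.2 + pvGetB board (i + d.1) (j + d.2))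
      else s
    else s
  else s

-- number of unvisited cells; termination measure of the while-loop
def pvUnvis (v : List (List Bool)) : Nat :=
  (v.map (fun r => r.countP (fun b => b = false))).sum

theorem pvCountP_set_true (row : List Bool) (k : Nat) (h : row[k]? = some false) :
    ((row.set k true).countP (fun b => b = false)) + 1 = row.countP (fun b => b = false) := by
  induction row generalizing k with
  | nil => simp at h
  | cons a t ih =>
    cases k with
    | zero =>
      simp only [List.getElem?_cons_zero, Option.some.injEq] at h
      subst h
      simp
    | succ k =>
      simp only [List.getElem?_cons_succ] at h
      have := ih k h
      simp only [List.set_cons_succ, List.countP_cons]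
      omega

theorem pvUnvis_set_true (v : List (List Bool)) (i j : Int) (hi : 0 ≤ i) (hj : 0 ≤ j)
    (h : pvGetV v i j = false) : pvUnvis (pvSet2 v i j true) + 1 = pvUnvis v := by
  unfold pvGetV at h
  rw [PySem.List.pyGet?_of_nonneg _ hi] at h
  cases hrow : v[i.toNat]? with
  | none => rw [hrow] at h; simp [PySem.List.pyGet?, PySem.List.pyIdx?] at h
  | some row =>
    rw [hrow] at h
    simp only [Option.getD_some] at h
    rw [PySem.List.pyGet?_of_nonneg _ hj] at h
    cases hcell : row[j.toNat]? with
    | none => rw [hcell] at h; simp at h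
    | some b =>
      rw [hcell] at h; simp only [Option.getD_some] at h; subst h
      obtain ⟨hlt, hrowe⟩ := List.getElem?_eq_some_iff.mp hrow
      obtain ⟨hjlt, hcelle⟩ := List.getElem?_eq_some_iff.mp hcell
      unfold pvUnvis pvSet2
      have hget : v.getD i.toNat [] = row := by rw [List.getD_eq_getElem _ _ hlt, hrowe]
      rw [hget, List.map_set, List.sum_set]
      have hlt' : i.toNat < (v.map (fun r => r.countP (fun b => b = false))).length := by
        simpa using hlt
      conv_rhs => rw [← List.set_getElem_self hlt', List.sum_set]
      have hmap : (v.map (fun r => r.countP (fun b => b = false)))[i.toNat]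
          = row.countP (fun b => b = false) := by
        rw [List.getElem_map, hrowe]
      have hcnt := pvCountP_set_true row j.toNat (by rw [List.getElem?_eq_getElem hjlt, hcelle])
      rw [hmap, if_pos hlt', if_pos hlt']
      omega

def pvFoldNbr (board : List (List Int)) (N L R i j value : Int)
    (s : List (Int × Int) × List (List Bool) × Int × Int) :
    List (Int × Int) × List (List Bool) × Int × Int :=
  pvDirs.foldl (pvNbr board N L R i j value) s

theorem pvNbr_measure (board : List (List Int)) (N L R i j value : Int) (s) (d : Int × Int) :
    (pvNbr board N L R i j value s d).1.length + pvUnvis (pvNbr board N L R i j value s d).2.1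
      ≤ s.1.length + pvUnvis s.2.1 := by
  unfold pvNbr
  split
  · split
    · split
      · rename_i hg hv _
        have := pvUnvis_set_true s.2.1 (i + d.1) (j + d.2) hg.1.1 hg.2.1 hv
        simp only [List.length_append, List.length_cons, List.length_nil]
        omega
      · exact le_refl _
    · exact le_refl _
  · exact le_refl _

theorem pvFoldl_nbr_measure (board : List (List Int)) (N L R i j value : Int)
    (ds : List (Int × Int)) :
    ∀ s : List (Int × Int) × List (List Bool) × Int × Int,
      (ds.foldl (pvNbr board N L R i j value) s).1.length
        + pvUnvis ((ds.foldl (pvNbr board N L R i j value) s)).2.1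
      ≤ s.1.length + pvUnvis s.2.1 := by
  induction ds with
  | nil => intro s; exact le_refl _
  | cons d t ih =>
    intro s
    calc _ ≤ _ := ih (pvNbr board N L R i j value s d)
      _ ≤ _ := pvNbr_measure board N L R i j value s d

-- the `while queue:` loop of bfs; returns (count_country, sum_people, mem_country, visited)
def bfsLoop (board : List (List Int)) (N L R : Int)
    (queue : List (Int × Int)) (visited : List (List Bool))
    (cnt sum : Int) (mem : List (Int × Int)) :
    Int × Int × List (Int × Int) × List (List Bool) :=
  match queue with
  | [] => (cnt, sum, mem, visited)
  | (i, j) :: rest =>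
    let s := pvFoldNbr board N L R i j (pvGetB board i j) (rest, visited, cnt, sum)
    bfsLoop board N L R s.1 s.2.1 s.2.2.1 s.2.2.2 (mem ++ [(i, j)])
termination_by queue.length + pvUnvis visited
decreasing_by
  have := pvFoldl_nbr_measure board N L R i j (pvGetB board i j) pvDirs (rest, visited, cnt, sum)
  simp only [List.length_cons, pvFoldNbr] at *
  omega

-- port of A's bfs: returns (count_country, board, visited) after the averaging write-back
def bfsA (i j : Int) (board : List (List Int)) (visited : List (List Bool)) (N L R : Int) :
    Int × List (List Int) × List (List Bool) :=
  let r := bfsLoop board N L R [(i, j)] visited 1 (pvGetB board i j) []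
  let newv := PySem.Int.floordiv r.2.1 r.1
  (r.1, r.2.2.1.foldl (fun b c => pvSet2 b c.1 c.2 newv) board, r.2.2.2)

-- body of A's doubly nested loop; state = (board, visited, flag)
def stepCell (N L R : Int) (st : List (List Int) × List (List Bool) × Bool) (c : Int × Int) :
    List (List Int) × List (List Bool) × Bool :=
  if pvGetV st.2.1 c.1 c.2 = false then
    ((bfsA c.1 c.2 st.1 (pvSet2 st.2.1 c.1 c.2 true) N L R).2.1,
     (bfsA c.1 c.2 st.1 (pvSet2 st.2.1 c.1 c.2 true) N L R).2.2,
     st.2.2 || decide (1 < (bfsA c.1 c.2 st.1 (pvSet2 st.2.1 c.1 c.2 true) N L R).1))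
  else st

def has_more (board : List (List Int)) (N : Int) (L : Int) (R : Int) : Bool :=
  ((PySem.List.pyRange 0 N 1).foldl (fun st i =>
      (PySem.List.pyRange 0 N 1).foldl (fun st j => stepCell N L R st (i, j)) st)
    (board, List.replicate N.toNat (List.replicate N.toNat false), false)).2.2

-- ===== PORT B =====
def has_more_alt (board : List (List Int)) (N : Int) (L : Int) (R : Int) : Bool :=
  (PySem.List.pyRange 0 N 1).any fun i =>
    (PySem.List.pyRange 0 N 1).any fun j =>
      (decide (j + 1 < N) &&
        decide (L ≤ |pvGetB board i j - pvGetB board i (j + 1)| ∧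
                |pvGetB board i j - pvGetB board i (j + 1)| ≤ R)) ||
      (decide (i + 1 < N) &&
        decide (L ≤ |pvGetB board i j - pvGetB board (i + 1) j| ∧
                |pvGetB board i j - pvGetB board (i + 1) j| ≤ R))

-- ===== PRECONDITION & SPEC =====
-- Pre_ excludes exactly the inputs where A raises IndexError: 0 < N but the board has fewer
-- than N rows or some of its first N rows has fewer than N entries.
def Pre_has_more (board : List (List Int)) (N : Int) (L : Int) (R : Int) : Prop :=
  N ≤ 0 ∨ (N ≤ (board.length : Int) ∧ ∀ row ∈ board.take N.toNat, N ≤ (row.length : Int))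
instance (board : List (List Int)) (N : Int) (L : Int) (R : Int) : Decidable (Pre_has_more board N L R) := by unfold Pre_has_more; infer_instance

def pvWitness_has_more : List (List Int) × Int × Int × Int := ([[1, 2], [5, 9]], 2, 1, 3)

def Spec_has_more (board : List (List Int)) (N : Int) (L : Int) (R : Int) (out : Bool) : Prop := out = has_more_alt board N L R
instance (board : List (List Int)) (N : Int) (L : Int) (R : Int) (out : Bool) : Decidable (Spec_has_more board N L R out) := by unfold Spec_has_more; infer_instance

-- ===== CLAIM (what is proved, stated in full; the proofs are below) =====
def Claim_equal_has_more : Prop := ∀ (board : List (List Int)) (N : Int) (L : Int) (R : Int), Dom_has_more board N L R → Pre_has_more board N L R → Spec_has_more board N L R (has_more board N L R)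

-- ===== LEMMAS AND PROOFS =====

def inGrid (N : Int) (p : Int × Int) : Prop :=
  0 ≤ p.1 ∧ p.1 < N ∧ 0 ≤ p.2 ∧ p.2 < N

-- merged-pair condition between two cells of the ORIGINAL board
def condE (board : List (List Int)) (L R : Int) (p q : Int × Int) : Prop :=
  L ≤ |pvGetB board p.1 p.2 - pvGetB board q.1 q.2| ∧
  |pvGetB board p.1 p.2 - pvGetB board q.1 q.2| ≤ R

def noEdge (board : List (List Int)) (N L R : Int) : Prop :=
  ∀ i j : Int, inGrid N (i, j) →
    (j + 1 < N → ¬ condE board L R (i, j) (i, j + 1)) ∧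
    (i + 1 < N → ¬ condE board L R (i, j) (i + 1, j))

theorem alt_eq_false_iff (board : List (List Int)) (N L R : Int) :
    has_more_alt board N L R = false ↔ noEdge board N L R := by
  unfold has_more_alt noEdge condE
  constructor
  · intro h i j hij
    obtain ⟨g1, g2, g3, g4⟩ := hij
    have h2 := List.any_eq_false.mp h i (PySem.List.mem_pyRange_one.mpr ⟨g1, g2⟩)
    rw [Bool.not_eq_true] at h2
    have h3 := List.any_eq_false.mp h2 j (PySem.List.mem_pyRange_one.mpr ⟨g3, g4⟩)
    rw [Bool.not_eq_true] at h3
    simp only [Bool.or_eq_false_iff, Bool.and_eq_false_iff, decide_eq_false_iff_not] at h3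
    constructor
    · intro hj1
      rcases h3.1 with hcase | hcase
      · exact absurd hj1 hcase
      · exact hcase
    · intro hi1
      rcases h3.2 with hcase | hcase
      · exact absurd hi1 hcase
      · exact hcase
  · intro h
    rw [List.any_eq_false]
    intro i hi
    rw [Bool.not_eq_true, List.any_eq_false]
    intro j hj
    rw [Bool.not_eq_true]
    rw [PySem.List.mem_pyRange_one] at hi hj
    obtain ⟨hc1, hc2⟩ := h i j ⟨hi.1, hi.2, hj.1, hj.2⟩
    simp only [Bool.or_eq_false_iff, Bool.and_eq_false_iff, decide_eq_false_iff_not]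
    constructor
    · by_cases hb : j + 1 < N
      · exact Or.inr (hc1 hb)
      · exact Or.inl hb
    · by_cases hb : i + 1 < N
      · exact Or.inr (hc2 hb)
      · exact Or.inl hb

def ShapeN (N : Int) (v : List (List Bool)) : Prop :=
  v.length = N.toNat ∧ ∀ r ∈ v, r.length = N.toNat

def markOf (N : Int) (lst : List (Int × Int)) : List (List Bool) :=
  lst.foldl (fun v c => pvSet2 v c.1 c.2 true)
    (List.replicate N.toNat (List.replicate N.toNat false))

theorem shape_set (N : Int) (v : List (List Bool)) (hs : ShapeN N v) (i j : Int) (x : Bool) :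
    ShapeN N (pvSet2 v i j x) := by
  obtain ⟨hl, hr⟩ := hs
  by_cases hi : i.toNat < v.length
  · constructor
    · simp [pvSet2, hl]
    · intro r hrm
      rcases List.mem_or_eq_of_mem_set hrm with hm | he
      · exact hr r hm
      · subst he
        rw [List.length_set, List.getD_eq_getElem _ _ hi]
        exact hr _ (List.getElem_mem hi)
  · unfold pvSet2
    rw [List.set_eq_of_length_le (by omega)]
    exact ⟨hl, hr⟩

theorem getV_set_self (N : Int) (v : List (List Bool)) (hs : ShapeN N v) (c : Int × Int)
    (hc : inGrid N c) (x : Bool) : pvGetV (pvSet2 v c.1 c.2 x) c.1 c.2 = x := by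
  obtain ⟨g1, g2, g3, g4⟩ := hc
  obtain ⟨hl, hr⟩ := hs
  have hi : c.1.toNat < v.length := by omega
  have hrow : (v.getD c.1.toNat []).length = N.toNat := by
    rw [List.getD_eq_getElem _ _ hi]
    exact hr _ (List.getElem_mem hi)
  have hj : c.2.toNat < (v.getD c.1.toNat []).length := by omega
  unfold pvGetV pvSet2
  rw [PySem.List.pyGet?_of_nonneg _ g1, List.getElem?_set_self hi, Option.getD_some,
    PySem.List.pyGet?_of_nonneg _ g3, List.getElem?_set_self hj, Option.getD_some]

theorem getV_set_other (v : List (List Bool)) (c q : Int × Int)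
    (hc1 : 0 ≤ c.1) (hc2 : 0 ≤ c.2) (hq1 : 0 ≤ q.1) (hq2 : 0 ≤ q.2) (hne : q ≠ c) (x : Bool) :
    pvGetV (pvSet2 v c.1 c.2 x) q.1 q.2 = pvGetV v q.1 q.2 := by
  unfold pvGetV pvSet2
  rw [PySem.List.pyGet?_of_nonneg _ hq1, PySem.List.pyGet?_of_nonneg _ hq1]
  by_cases h1 : q.1.toNat = c.1.toNat
  · by_cases hi : c.1.toNat < v.length
    · rw [h1, List.getElem?_set_self hi, Option.getD_some, List.getD_eq_getElem _ _ hi,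
        List.getElem?_eq_getElem hi, Option.getD_some]
      have h2 : q.2.toNat ≠ c.2.toNat := by
        intro he
        exact hne (Prod.ext_iff.mpr ⟨by omega, by omega⟩)
      rw [PySem.List.pyGet?_of_nonneg _ hq2, PySem.List.pyGet?_of_nonneg _ hq2,
        List.getElem?_set_ne (fun he => h2 he.symm)]
    · rw [List.set_eq_of_length_le (by omega)]
  · rw [List.getElem?_set_ne (fun he => h1 he.symm)]

theorem getV_replicate (N : Int) (q : Int × Int) (hq : inGrid N q) :
    pvGetV (List.replicate N.toNat (List.replicate N.toNat false)) q.1 q.2 = false := by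
  obtain ⟨g1, g2, g3, g4⟩ := hq
  unfold pvGetV
  rw [PySem.List.pyGet?_of_nonneg _ g1, List.getElem?_replicate_of_lt (by omega),
    Option.getD_some, PySem.List.pyGet?_of_nonneg _ g3,
    List.getElem?_replicate_of_lt (by omega), Option.getD_some]

theorem getV_foldl_mark (N : Int) (q : Int × Int) (hq : inGrid N q) :
    ∀ (lst : List (Int × Int)) (v : List (List Bool)), (∀ c ∈ lst, inGrid N c) → ShapeN N v →
      pvGetV (lst.foldl (fun v c => pvSet2 v c.1 c.2 true) v) q.1 q.2
        = (decide (q ∈ lst) || pvGetV v q.1 q.2) := by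
  intro lst
  induction lst with
  | nil => intro v _ _; simp
  | cons c t ih =>
    intro v hall hv
    have hc := hall c (by simp)
    have hallt : ∀ x ∈ t, inGrid N x := fun x hx => hall x (by simp [hx])
    rw [List.foldl_cons, ih _ hallt (shape_set N v hv c.1 c.2 true)]
    by_cases he : q = c
    · subst he
      rw [getV_set_self N v hv q hq true]
      simp
    · rw [getV_set_other v c q hc.1 hc.2.2.1 hq.1 hq.2.2.1 he true]
      simp [he]

theorem shape_replicate (N : Int) :
    ShapeN N (List.replicate N.toNat (List.replicate N.toNat false)) := by
  constructor
  · simp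
  · intro r hr
    simp_all [List.eq_of_mem_replicate hr]

theorem getV_markOf (N : Int) (lst : List (Int × Int)) (q : Int × Int)
    (hall : ∀ c ∈ lst, inGrid N c) (hq : inGrid N q) :
    pvGetV (markOf N lst) q.1 q.2 = decide (q ∈ lst) := by
  have := getV_foldl_mark N q hq lst _ hall (shape_replicate N)
  rw [markOf, this, getV_replicate N q hq, Bool.or_false]

theorem markOf_append_singleton (N : Int) (pre : List (Int × Int)) (c : Int × Int) :
    markOf N (pre ++ [c]) = pvSet2 (markOf N pre) c.1 c.2 true := by
  simp [markOf, List.foldl_append]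

theorem pre_bounds (board : List (List Int)) (N : Int) (h1 : N ≤ (board.length : Int))
    (h2 : ∀ row ∈ board.take N.toNat, N ≤ (row.length : Int)) (i j : Int)
    (hg : inGrid N (i, j)) :
    ∃ hl : i.toNat < board.length, j.toNat < (board[i.toNat]).length := by
  obtain ⟨g1, g2, g3, g4⟩ := hg
  have hl : i.toNat < board.length := by omega
  refine ⟨hl, ?_⟩
  have hmem : board[i.toNat] ∈ board.take N.toNat := by
    have hlt : i.toNat < (board.take N.toNat).length := by simp; omega
    have h5 : (board.take N.toNat)[i.toNat]? = board[i.toNat]? :=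
      List.getElem?_take_of_lt (by omega)
    have h3 : (board.take N.toNat)[i.toNat] = board[i.toNat] := by
      have h4 := List.getElem?_eq_getElem hlt
      rw [h5, List.getElem?_eq_getElem hl] at h4
      exact (Option.some.injEq _ _).mp h4.symm
    rw [← h3]
    exact List.getElem_mem hlt
  have := h2 _ hmem
  omega

theorem set2_self (m : List (List Int)) (i j : Int) (hi : 0 ≤ i) (hj : 0 ≤ j)
    (hlen : i.toNat < m.length) (hrow : j.toNat < (m[i.toNat]).length) :
    pvSet2 m i j (pvGetB m i j) = m := by
  unfold pvSet2 pvGetB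
  rw [PySem.List.pyGet?_of_nonneg _ hi, List.getElem?_eq_getElem hlen, Option.getD_some,
    PySem.List.pyGet?_of_nonneg _ hj, List.getElem?_eq_getElem hrow, Option.getD_some,
    List.getD_eq_getElem _ _ hlen, List.set_getElem_self hrow, List.set_getElem_self hlen]

theorem foldl_pvNbr_cnt_le (board : List (List Int)) (N L R i j value : Int)
    (ds : List (Int × Int)) :
    ∀ s, s.2.2.1 ≤ (ds.foldl (pvNbr board N L R i j value) s).2.2.1 := by
  induction ds with
  | nil => intro s; exact le_refl _
  | cons d t ih =>
    intro s
    have hstep : s.2.2.1 ≤ (pvNbr board N L R i j value s d).2.2.1 := by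
      unfold pvNbr
      split
      · split
        · split
          · simp
          · exact le_refl _
        · exact le_refl _
      · exact le_refl _
    calc s.2.2.1 ≤ (pvNbr board N L R i j value s d).2.2.1 := hstep
      _ ≤ _ := ih (pvNbr board N L R i j value s d)

theorem bfsLoop_cnt_le (board : List (List Int)) (N L R : Int) (queue : List (Int × Int))
    (visited : List (List Bool)) (cnt sum : Int) (mem : List (Int × Int)) :
    cnt ≤ (bfsLoop board N L R queue visited cnt sum mem).1 := by
  fun_induction bfsLoop board N L R queue visited cnt sum mem with
  | case1 => exact le_refl _
  | case2 visited cnt sum mem i j rest s ih =>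
    exact le_trans (foldl_pvNbr_cnt_le board N L R i j (pvGetB board i j)
      pvDirs (rest, visited, cnt, sum)) ih

theorem pvNbr_cases (board : List (List Int)) (N L R i j value : Int) (s) (d : Int × Int) :
    (pvNbr board N L R i j value s d = s ∧
      (inGrid N (i + d.1, j + d.2) →
        pvGetV s.2.1 (i + d.1) (j + d.2) = true ∨
        ¬(L ≤ |value - pvGetB board (i + d.1) (j + d.2)| ∧
          |value - pvGetB board (i + d.1) (j + d.2)| ≤ R)))
    ∨ s.2.2.1 + 1 ≤ (pvNbr board N L R i j value s d).2.2.1 := by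
  unfold pvNbr
  split
  · rename_i hguard
    split
    · rename_i hv
      split
      · rename_i hcond
        right; simp
      · rename_i hcond
        exact Or.inl ⟨rfl, fun _ => Or.inr hcond⟩
    · rename_i hv
      exact Or.inl ⟨rfl, fun _ => Or.inl (by revert hv; cases pvGetV s.2.1 (i + d.1) (j + d.2) <;> simp)⟩
  · rename_i hguard
    refine Or.inl ⟨rfl, fun hg => absurd ⟨⟨hg.1, hg.2.1⟩, hg.2.2.1, hg.2.2.2⟩ hguard⟩

theorem foldl_nbr_id_of_cnt_eq (board : List (List Int)) (N L R i j value : Int)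
    (ds : List (Int × Int)) :
    ∀ s, (ds.foldl (pvNbr board N L R i j value) s).2.2.1 = s.2.2.1 →
      ds.foldl (pvNbr board N L R i j value) s = s ∧
      ∀ d ∈ ds, inGrid N (i + d.1, j + d.2) →
        pvGetV s.2.1 (i + d.1) (j + d.2) = true ∨
        ¬(L ≤ |value - pvGetB board (i + d.1) (j + d.2)| ∧
          |value - pvGetB board (i + d.1) (j + d.2)| ≤ R) := by
  induction ds with
  | nil => intro s _; exact ⟨rfl, by simp⟩
  | cons d t ih =>
    intro s h
    rcases pvNbr_cases board N L R i j value s d with ⟨hid, hprop⟩ | hinc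
    · rw [List.foldl_cons, hid] at h ⊢
      obtain ⟨hfold, hrest⟩ := ih s h
      refine ⟨hfold, ?_⟩
      intro d' hd'
      rcases List.mem_cons.mp hd' with he | hm
      · subst he; exact hprop
      · exact hrest d' hm
    · exfalso
      have := foldl_pvNbr_cnt_le board N L R i j value t (pvNbr board N L R i j value s d)
      rw [List.foldl_cons] at h
      omega

theorem bfs_cnt_one (board : List (List Int)) (N L R i j : Int) (vis : List (List Bool))
    (h1 : (bfsLoop board N L R [(i, j)] vis 1 (pvGetB board i j) []).1 = 1) :
    bfsLoop board N L R [(i, j)] vis 1 (pvGetB board i j) []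
      = (1, pvGetB board i j, [(i, j)], vis) ∧
    ∀ d ∈ pvDirs, inGrid N (i + d.1, j + d.2) →
      pvGetV vis (i + d.1) (j + d.2) = true ∨
      ¬(L ≤ |pvGetB board i j - pvGetB board (i + d.1) (j + d.2)| ∧
        |pvGetB board i j - pvGetB board (i + d.1) (j + d.2)| ≤ R) := by
  have heq : bfsLoop board N L R [(i, j)] vis 1 (pvGetB board i j) []
      = bfsLoop board N L R
          (pvFoldNbr board N L R i j (pvGetB board i j) ([], vis, 1, pvGetB board i j)).1
          (pvFoldNbr board N L R i j (pvGetB board i j) ([], vis, 1, pvGetB board i j)).2.1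
          (pvFoldNbr board N L R i j (pvGetB board i j) ([], vis, 1, pvGetB board i j)).2.2.1
          (pvFoldNbr board N L R i j (pvGetB board i j) ([], vis, 1, pvGetB board i j)).2.2.2
          ([] ++ [(i, j)]) := by
    rw [bfsLoop]
  have hle1 : (1:Int) ≤ (pvFoldNbr board N L R i j (pvGetB board i j)
      ([], vis, 1, pvGetB board i j)).2.2.1 :=
    foldl_pvNbr_cnt_le board N L R i j (pvGetB board i j) pvDirs ([], vis, 1, pvGetB board i j)
  have hle2 := bfsLoop_cnt_le board N L R
    (pvFoldNbr board N L R i j (pvGetB board i j) ([], vis, 1, pvGetB board i j)).1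
    (pvFoldNbr board N L R i j (pvGetB board i j) ([], vis, 1, pvGetB board i j)).2.1
    (pvFoldNbr board N L R i j (pvGetB board i j) ([], vis, 1, pvGetB board i j)).2.2.1
    (pvFoldNbr board N L R i j (pvGetB board i j) ([], vis, 1, pvGetB board i j)).2.2.2
    ([] ++ [(i, j)])
  rw [heq] at h1
  have hcnt : (pvFoldNbr board N L R i j (pvGetB board i j)
      ([], vis, 1, pvGetB board i j)).2.2.1 = 1 := by omega
  obtain ⟨hfold, hprops⟩ := foldl_nbr_id_of_cnt_eq board N L R i j (pvGetB board i j)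
    pvDirs ([], vis, 1, pvGetB board i j) hcnt
  have hfold' : pvFoldNbr board N L R i j (pvGetB board i j) ([], vis, 1, pvGetB board i j)
      = ([], vis, 1, pvGetB board i j) := hfold
  rw [heq, hfold']
  refine ⟨?_, hprops⟩
  rw [bfsLoop]
  simp

theorem floordiv_one (a : Int) : PySem.Int.floordiv a 1 = a := by
  rw [PySem.Int.floordiv_eq_ediv_of_pos (by norm_num : (0:Int) < 1)]
  exact Int.ediv_one a

theorem bfsA_cnt_ge_one (i j : Int) (board : List (List Int)) (vis : List (List Bool))
    (N L R : Int) : 1 ≤ (bfsA i j board vis N L R).1 := by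
  exact bfsLoop_cnt_le board N L R [(i, j)] vis 1 (pvGetB board i j) []

theorem bfsA_cnt_one (board : List (List Int)) (N L R : Int)
    (h1 : N ≤ (board.length : Int)) (h2 : ∀ row ∈ board.take N.toNat, N ≤ (row.length : Int))
    (i j : Int) (hg : inGrid N (i, j)) (vis : List (List Bool))
    (hc : (bfsA i j board vis N L R).1 = 1) :
    bfsA i j board vis N L R = (1, board, vis) ∧
    ∀ d ∈ pvDirs, inGrid N (i + d.1, j + d.2) →
      pvGetV vis (i + d.1) (j + d.2) = true ∨
      ¬ condE board L R (i, j) (i + d.1, j + d.2) := by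
  have hc' : (bfsLoop board N L R [(i, j)] vis 1 (pvGetB board i j) []).1 = 1 := hc
  obtain ⟨hloop, hprops⟩ := bfs_cnt_one board N L R i j vis hc'
  obtain ⟨hl, hr⟩ := pre_bounds board N h1 h2 i j hg
  constructor
  · simp only [bfsA, hloop, floordiv_one, List.foldl_cons, List.foldl_nil]
    rw [set2_self board i j hg.1 hg.2.2.1 hl hr]
  · intro d hd hgq
    exact hprops d hd hgq

theorem noEdge_dir (board : List (List Int)) (N L R : Int) (hne : noEdge board N L R)
    (p d : Int × Int) (hd : d ∈ pvDirs) (hp : inGrid N p)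
    (hq : inGrid N (p.1 + d.1, p.2 + d.2)) :
    ¬ condE board L R p (p.1 + d.1, p.2 + d.2) := by
  have hsym : ∀ a b : Int × Int, condE board L R a b → condE board L R b a := by
    intro a b hab
    exact ⟨by rw [abs_sub_comm]; exact hab.1, by rw [abs_sub_comm]; exact hab.2⟩
  simp only [pvDirs, List.mem_cons, List.not_mem_nil, or_false] at hd
  obtain ⟨p1, p2⟩ := p
  obtain ⟨a1, a2, a3, a4⟩ := hp
  rcases hd with rfl | rfl | rfl | rfl <;> simp only at hq ⊢ <;>
    obtain ⟨b1, b2, b3, b4⟩ := hq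
  · have c4 : p2 + 1 < N := b4
    rw [show (p1 + 0 : Int) = p1 from by ring]
    exact (hne p1 p2 ⟨a1, a2, a3, a4⟩).1 (by omega)
  · have c3 : (0:Int) ≤ p2 + -1 := b3
    rw [show (p1 + 0 : Int) = p1 from by ring]
    intro hc
    have h := (hne p1 (p2 + -1) ⟨a1, a2, c3, by omega⟩).1 (by omega)
    rw [show (p2 + -1 + 1 : Int) = p2 from by ring] at h
    exact h (hsym _ _ hc)
  · have c2 : p1 + 1 < N := b2
    rw [show (p2 + 0 : Int) = p2 from by ring]
    exact (hne p1 p2 ⟨a1, a2, a3, a4⟩).2 (by omega)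
  · have c1 : (0:Int) ≤ p1 + -1 := b1
    rw [show (p2 + 0 : Int) = p2 from by ring]
    intro hc
    have h := (hne (p1 + -1) p2 ⟨c1, by omega, a3, a4⟩).2 (by omega)
    rw [show (p1 + -1 + 1 : Int) = p1 from by ring] at h
    exact h (hsym _ _ hc)

theorem bfsA_of_noEdge (board : List (List Int)) (N L R : Int)
    (h1 : N ≤ (board.length : Int)) (h2 : ∀ row ∈ board.take N.toNat, N ≤ (row.length : Int))
    (hne : noEdge board N L R) (i j : Int) (hg : inGrid N (i, j)) (vis : List (List Bool)) :
    bfsA i j board vis N L R = (1, board, vis) := by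
  have hid : ∀ d ∈ pvDirs, ∀ s, pvNbr board N L R i j (pvGetB board i j) s d = s := by
    intro d hd s
    unfold pvNbr
    split
    · rename_i hguard
      split
      · split
        · rename_i hcond
          exact absurd hcond (noEdge_dir board N L R hne (i, j) d hd hg
            ⟨hguard.1.1, hguard.1.2, hguard.2.1, hguard.2.2⟩)
        · rfl
      · rfl
    · rfl
  have hfold : ∀ s, pvFoldNbr board N L R i j (pvGetB board i j) s = s := by
    intro s
    have : ∀ (ds : List (Int × Int)), (∀ d ∈ ds, ∀ s,
        pvNbr board N L R i j (pvGetB board i j) s d = s) →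
        ∀ s, ds.foldl (pvNbr board N L R i j (pvGetB board i j)) s = s := by
      intro ds
      induction ds with
      | nil => intro _ s; rfl
      | cons d t ih =>
        intro hds s
        rw [List.foldl_cons, hds d (by simp) s]
        exact ih (fun d' hd' => hds d' (by simp [hd'])) s
    exact this pvDirs hid s
  have hloop : bfsLoop board N L R [(i, j)] vis 1 (pvGetB board i j) []
      = (1, pvGetB board i j, [(i, j)], vis) := by
    rw [bfsLoop, hfold ([], vis, 1, pvGetB board i j), bfsLoop]
    simp
  obtain ⟨hl, hr⟩ := pre_bounds board N h1 h2 i j hg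
  simp only [bfsA, hloop, floordiv_one, List.foldl_cons, List.foldl_nil]
  rw [set2_self board i j hg.1 hg.2.2.1 hl hr]

theorem foldl_stepCell_flag_mono (N L R : Int) (cells : List (Int × Int)) :
    ∀ st, st.2.2 = true → (cells.foldl (stepCell N L R) st).2.2 = true := by
  induction cells with
  | nil => intro st h; exact h
  | cons c t ih =>
    intro st h
    rw [List.foldl_cons]
    apply ih
    unfold stepCell
    split
    · simp [h]
    · exact h

def gridList (N : Int) : List (Int × Int) :=
  (PySem.List.pyRange 0 N 1).flatMap (fun i => (PySem.List.pyRange 0 N 1).map (fun j => (i, j)))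

theorem has_more_eq_flat (board : List (List Int)) (N L R : Int) :
    has_more board N L R = ((gridList N).foldl (stepCell N L R)
      (board, markOf N [], false)).2.2 := by
  unfold has_more gridList markOf
  rw [List.foldl_flatMap]
  simp [List.foldl_map]

theorem gridList_mem (N : Int) : ∀ c ∈ gridList N, inGrid N c := by
  intro c hc
  simp only [gridList, List.mem_flatMap, List.mem_map, PySem.List.mem_pyRange_one] at hc
  obtain ⟨i, hi, j, hj, rfl⟩ := hc
  exact ⟨hi.1, hi.2, hj.1, hj.2⟩

theorem gridList_split (N : Int) (p : Int × Int) (hp : inGrid N p) :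
    ∃ l1 l2, gridList N = l1 ++ p :: l2 ∧
      ∀ c ∈ l1, c.1 < p.1 ∨ (c.1 = p.1 ∧ c.2 < p.2) := by
  obtain ⟨i, j⟩ := p
  obtain ⟨g1, g2, g3, g4⟩ := hp
  refine ⟨(PySem.List.pyRange 0 i 1).flatMap
        (fun a => (PySem.List.pyRange 0 N 1).map (fun b => (a, b)))
      ++ (PySem.List.pyRange 0 j 1).map (fun b => (i, b)),
    (PySem.List.pyRange (j + 1) N 1).map (fun b => (i, b))
      ++ (PySem.List.pyRange (i + 1) N 1).flatMap
        (fun a => (PySem.List.pyRange 0 N 1).map (fun b => (a, b))), ?_, ?_⟩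
  · have hrow : (PySem.List.pyRange 0 N 1).map (fun b => ((i : Int), b))
        = (PySem.List.pyRange 0 j 1).map (fun b => (i, b))
          ++ ((i, j) :: (PySem.List.pyRange (j + 1) N 1).map (fun b => (i, b))) := by
      rw [PySem.List.pyRange_one_append 0 j N g3 (le_of_lt g4),
        PySem.List.pyRange_one_cons g4]
      simp
    unfold gridList
    set F := fun a : Int => (PySem.List.pyRange 0 N 1).map (fun b => ((a : Int), b)) with hF
    rw [PySem.List.pyRange_one_append 0 i N g1 (le_of_lt g2),
      PySem.List.pyRange_one_cons g2, List.flatMap_append, List.flatMap_cons]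
    simp only [hF]
    rw [hrow]
    simp [List.append_assoc]
  · intro c hc
    simp only [List.mem_append, List.mem_flatMap, List.mem_map,
      PySem.List.mem_pyRange_one] at hc
    rcases hc with ⟨a, ha, b, _, rfl⟩ | ⟨b, hb, rfl⟩
    · exact Or.inl ha.2
    · exact Or.inr ⟨rfl, hb.2⟩

theorem outer_noEdge (board : List (List Int)) (N L R : Int)
    (h1 : N ≤ (board.length : Int)) (h2 : ∀ row ∈ board.take N.toNat, N ≤ (row.length : Int))
    (hne : noEdge board N L R) (cells : List (Int × Int)) (hcells : ∀ c ∈ cells, inGrid N c) :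
    ∀ vis, ∃ vis', cells.foldl (stepCell N L R) (board, vis, false) = (board, vis', false) := by
  have main : ∀ (cs : List (Int × Int)), (∀ c ∈ cs, inGrid N c) → ∀ vis,
      ∃ vis', cs.foldl (stepCell N L R) (board, vis, false) = (board, vis', false) := by
    intro cs
    induction cs with
    | nil => intro _ vis; exact ⟨vis, rfl⟩
    | cons c t ih =>
      intro hcs vis
      have hc := hcs c (by simp)
      have ht : ∀ x ∈ t, inGrid N x := fun x hx => hcs x (by simp [hx])
      rw [List.foldl_cons]
      by_cases hv : pvGetV vis c.1 c.2 = false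
      · have hb := bfsA_of_noEdge board N L R h1 h2 hne c.1 c.2
          ⟨hc.1, hc.2.1, hc.2.2.1, hc.2.2.2⟩ (pvSet2 vis c.1 c.2 true)
        have hstep : stepCell N L R (board, vis, false) c
            = (board, pvSet2 vis c.1 c.2 true, false) := by
          unfold stepCell
          rw [if_pos hv, hb]
          simp
        rw [hstep]
        exact ih ht _
      · have hstep : stepCell N L R (board, vis, false) c = (board, vis, false) := by
          unfold stepCell
          rw [if_neg hv]
        rw [hstep]
        exact ih ht vis
  exact main cells hcells

theorem dir_ne (p d : Int × Int) (hd : d ∈ pvDirs) : (p.1 + d.1, p.2 + d.2) ≠ p := by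
  simp only [pvDirs, List.mem_cons, List.not_mem_nil, or_false] at hd
  rcases hd with rfl | rfl | rfl | rfl <;>
    (intro h; rw [Prod.ext_iff] at h; simp only at h; omega)

theorem outer_cnt_one (board : List (List Int)) (N L R : Int)
    (h1 : N ≤ (board.length : Int)) (h2 : ∀ row ∈ board.take N.toNat, N ≤ (row.length : Int))
    (cells : List (Int × Int)) :
    ∀ pre : List (Int × Int), (∀ c ∈ cells, inGrid N c) → (∀ c ∈ pre, inGrid N c) →
    (cells.foldl (stepCell N L R) (board, markOf N pre, false)).2.2 = false →
    ∀ l1 p l2, cells = l1 ++ p :: l2 → p ∉ pre ++ l1 →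
    ∀ d ∈ pvDirs, inGrid N (p.1 + d.1, p.2 + d.2) → (p.1 + d.1, p.2 + d.2) ∉ pre ++ l1 →
    ¬ condE board L R p (p.1 + d.1, p.2 + d.2) := by
  induction cells with
  | nil =>
    intro pre _ _ _ l1 p l2 heq
    exact absurd heq (by simp)
  | cons c t ih =>
    intro pre hcs hpre hflag l1 p l2 heq hpnot d hd hgq hqnot
    have hc : inGrid N c := hcs c (by simp)
    have ht : ∀ x ∈ t, inGrid N x := fun x hx => hcs x (by simp [hx])
    rw [List.foldl_cons] at hflag
    by_cases hv : c ∈ pre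
    · have hvv : pvGetV (markOf N pre) c.1 c.2 = true := by
        rw [getV_markOf N pre c hpre hc]
        simp [hv]
      have hstep : stepCell N L R (board, markOf N pre, false) c
          = (board, markOf N pre, false) := by
        unfold stepCell
        rw [if_neg (by rw [hvv]; simp)]
      rw [hstep] at hflag
      cases l1 with
      | nil =>
        rw [List.nil_append] at heq
        injection heq with he1 he2
        subst he1; subst he2
        exact absurd hv (by simpa using hpnot)
      | cons a l1' =>
        rw [List.cons_append] at heq
        injection heq with he1 he2
        subst he1
        have hp' : p ∉ pre ++ l1' := by
          simp only [List.mem_append, List.mem_cons] at hpnot ⊢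
          tauto
        have hq' : (p.1 + d.1, p.2 + d.2) ∉ pre ++ l1' := by
          simp only [List.mem_append, List.mem_cons] at hqnot ⊢
          tauto
        exact ih pre ht hpre hflag l1' p l2 he2 hp' d hd hgq hq'
    · have hvv : pvGetV (markOf N pre) c.1 c.2 = false := by
        rw [getV_markOf N pre c hpre hc]
        simp [hv]
      have hpre' : ∀ x ∈ pre ++ [c], inGrid N x := by
        intro x hx
        rcases List.mem_append.mp hx with hx | hx
        · exact hpre x hx
        · rw [List.mem_singleton.mp hx]; exact hc
      have hm : pvSet2 (markOf N pre) c.1 c.2 true = markOf N (pre ++ [c]) :=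
        (markOf_append_singleton N pre c).symm
      have hge := bfsA_cnt_ge_one c.1 c.2 board (markOf N (pre ++ [c])) N L R
      have hr1 : (bfsA c.1 c.2 board (markOf N (pre ++ [c])) N L R).1 = 1 := by
        by_contra hne1
        have hflagT : (stepCell N L R (board, markOf N pre, false) c).2.2 = true := by
          unfold stepCell
          rw [if_pos hvv]
          simp only [hm, Bool.false_or, decide_eq_true_eq]
          omega
        have hT := foldl_stepCell_flag_mono N L R t _ hflagT
        rw [hT] at hflag
        exact absurd hflag (by simp)
      obtain ⟨hbfs, hprops⟩ := bfsA_cnt_one board N L R h1 h2 c.1 c.2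
        ⟨hc.1, hc.2.1, hc.2.2.1, hc.2.2.2⟩ (markOf N (pre ++ [c])) hr1
      have hstep : stepCell N L R (board, markOf N pre, false) c
          = (board, markOf N (pre ++ [c]), false) := by
        unfold stepCell
        rw [if_pos hvv]
        simp only [hm, hbfs]
        simp
      rw [hstep] at hflag
      cases l1 with
      | nil =>
        rw [List.nil_append] at heq
        injection heq with he1 he2
        subst he1; subst he2
        rcases hprops d hd hgq with hvt | hncond
        · exfalso
          rw [getV_markOf N (pre ++ [c]) (c.1 + d.1, c.2 + d.2) hpre' hgq] at hvt
          rw [decide_eq_true_eq] at hvt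
          rcases List.mem_append.mp hvt with hx | hx
          · exact absurd hx (by simpa using hqnot)
          · exact absurd (List.mem_singleton.mp hx) (dir_ne c d hd)
        · exact hncond
      | cons a l1' =>
        rw [List.cons_append] at heq
        injection heq with he1 he2
        subst he1
        have hp' : p ∉ (pre ++ [c]) ++ l1' := by
          simp only [List.mem_append, List.mem_cons] at hpnot ⊢
          tauto
        have hq' : (p.1 + d.1, p.2 + d.2) ∉ (pre ++ [c]) ++ l1' := by
          simp only [List.mem_append, List.mem_cons] at hqnot ⊢
          tauto
        exact ih (pre ++ [c]) ht hpre' hflag l1' p l2 he2 hp' d hd hgq hq'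

-- ===== VERDICT (by name: the statement is the Claim_ definition above) =====
theorem has_more_spec : Claim_equal_has_more := by
  unfold Claim_equal_has_more Spec_has_more
  intro board N L R _ hpre
  by_cases hN : N ≤ 0
  · have hr : PySem.List.pyRange 0 N 1 = [] := PySem.List.pyRange_one_eq_nil hN
    simp [has_more, has_more_alt, hr]
  · replace hN : 0 < N := by omega
    rcases hpre with hle | ⟨h1, h2⟩
    · omega
    cases halt : has_more_alt board N L R with
    | false =>
      have hne := (alt_eq_false_iff board N L R).mp halt
      rw [has_more_eq_flat]
      obtain ⟨vis', hfold⟩ := outer_noEdge board N L R h1 h2 hne (gridList N)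
        (gridList_mem N) (markOf N [])
      rw [hfold]
    | true =>
      by_contra hcon
      have hfalse : has_more board N L R = false := by
        cases hh : has_more board N L R
        · rfl
        · exact absurd hh hcon
      have hflat : ((gridList N).foldl (stepCell N L R)
          (board, markOf N [], false)).2.2 = false := by
        rw [← has_more_eq_flat]
        exact hfalse
      have hnoE : noEdge board N L R := by
        intro i j hij
        obtain ⟨gi1, gi2, gi3, gi4⟩ := hij
        obtain ⟨l1, l2, hsplit, hlt⟩ := gridList_split N (i, j) ⟨gi1, gi2, gi3, gi4⟩
        have hp1 : (i, j) ∉ ([] : List (Int × Int)) ++ l1 := by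
          rw [List.nil_append]
          intro hm
          have h5 := hlt _ hm
          have h6 : i < i ∨ (i = i ∧ j < j) := h5
          omega
        constructor
        · intro hj1
          have hgq : inGrid N ((i : Int) + 0, j + 1) :=
            ⟨by omega, by omega, by omega, by omega⟩
          have hq1 : ((i : Int) + 0, j + 1) ∉ ([] : List (Int × Int)) ++ l1 := by
            rw [List.nil_append]
            intro hm
            have h5 := hlt _ hm
            have h6 : i + 0 < i ∨ (i + 0 = i ∧ j + 1 < j) := h5
            omega
          have hres := outer_cnt_one board N L R h1 h2 (gridList N) []
            (gridList_mem N) (by simp) hflat l1 (i, j) l2 hsplit hp1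
            (0, 1) (by simp [pvDirs]) hgq hq1
          have hres' : ¬ condE board L R (i, j) (i + 0, j + 1) := hres
          rw [show (i + 0 : Int) = i from by ring] at hres'
          exact hres'
        · intro hi1
          have hgq : inGrid N ((i : Int) + 1, j + 0) :=
            ⟨by omega, by omega, by omega, by omega⟩
          have hq1 : ((i : Int) + 1, j + 0) ∉ ([] : List (Int × Int)) ++ l1 := by
            rw [List.nil_append]
            intro hm
            have h5 := hlt _ hm
            have h6 : i + 1 < i ∨ (i + 1 = i ∧ j + 0 < j) := h5
            omega
          have hres := outer_cnt_one board N L R h1 h2 (gridList N) []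
            (gridList_mem N) (by simp) hflat l1 (i, j) l2 hsplit hp1
            (1, 0) (by simp [pvDirs]) hgq hq1
          have hres' : ¬ condE board L R (i, j) (i + 1, j + 0) := hres
          rw [show (j + 0 : Int) = j from by ring] at hres'
          exact hres'
      have := (alt_eq_false_iff board N L R).mpr hnoE
      rw [this] at halt
      exact absurd halt (by simp)
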